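-- pv_equiv track=rewrite | github.com/alibaransel/code-jam | Round 1A 2013/Manage your Energy.py | solve
-- ===== SOURCE A (Python) =====
-- def solve(e, r, n, vList):
--     distances = [0 for _ in range(n)]
--     oldVList = []
--     oldVIList = []
--     for vI in range(n):
--         v = vList[vI]
--         for i in range(len(oldVList) - 1, -1, -1):
--             oldV = oldVList[i]
--             if oldV < v:
--                 oldVI = oldVIList.pop(i)
--                 oldVList.pop(i)
--                 distances[oldVI] = vI - oldVI
--             else:
--                 break
--         oldVList.append(v)
--         oldVIList.append(vI)
--     currE = e
--     result = 0
--     for i in range(n):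
--         v = vList[i]
--         d = distances[i]
--         if d == 0:
--             result += v * currE
--             currE = 0
--         else:
--             extraE = currE + d * r - e
--             if extraE > 0:
--                 eSpend = min(currE, extraE)
--                 currE -= eSpend
--                 result += v * eSpend
--         currE += r
--     return result
-- ===== SOURCE B (Python) =====
-- def solve(e, r, n, vList):
--     distances = []
--     for i in range(n):
--         d = 0
--         for j in range(i + 1, n):
--             if vList[j] > vList[i]:
--                 d = j - i
--                 break
--         distances.append(d)
--     currE = e
--     result = 0
--     for i in range(n):
--         v = vList[i]
--         d = distances[i]
--         if d == 0:
--             result += v * currE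
--             currE = 0
--         else:
--             extraE = currE + d * r - e
--             if extraE > 0:
--                 eSpend = min(currE, extraE)
--                 currE -= eSpend
--                 result += v * eSpend
--         currE += r
--     return result
-- ===== Notes on version B (the rewrite author's own statement) =====
-- stated objective: simpler
-- what changed: The amortized monotonic-stack computation of next-greater distances is replaced by a direct forward scan from each index (first strictly greater element), leaving the energy-greedy second loop unchanged.
import Mathlib
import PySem

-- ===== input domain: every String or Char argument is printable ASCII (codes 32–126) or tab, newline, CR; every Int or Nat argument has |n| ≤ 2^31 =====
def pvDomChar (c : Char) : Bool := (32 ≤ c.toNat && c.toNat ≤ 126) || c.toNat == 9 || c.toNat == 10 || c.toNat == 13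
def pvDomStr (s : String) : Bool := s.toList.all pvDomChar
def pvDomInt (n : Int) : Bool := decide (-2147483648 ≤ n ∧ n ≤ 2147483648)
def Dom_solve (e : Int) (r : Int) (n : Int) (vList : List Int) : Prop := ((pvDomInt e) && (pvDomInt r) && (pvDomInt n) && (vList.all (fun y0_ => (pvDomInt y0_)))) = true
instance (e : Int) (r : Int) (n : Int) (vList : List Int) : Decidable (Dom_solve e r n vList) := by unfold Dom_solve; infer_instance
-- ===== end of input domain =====

-- B replaces A's amortized monotonic-stack computation of the next-greater distances by a
-- direct forward scan from each index (objective: simpler); the energy loop is unchanged.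


-- ===== PORT A =====
-- inner 'for i in range(len(oldVList)-1, -1, -1)' loop; the 'else: break' arm returns the state unchanged
def solvePop (v : Int) (vI : Int) (idxs : List Int) (dist : List Int) (oldVL : List Int) (oldVIL : List Int) : List Int × List Int × List Int :=
  match idxs with
  | [] => (dist, oldVL, oldVIL)
  | i :: rest =>
    let oldV := (PySem.List.pyGet? oldVL i).getD 0
    if oldV < v then
      let p := (PySem.List.pop? oldVIL i).getD (0, oldVIL)
      let oldVI := p.1
      let oldVIL' := p.2
      let oldVL' := ((PySem.List.pop? oldVL i).getD (0, oldVL)).2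
      -- distances[oldVI] = vI - oldVI : oldVI is a previously stored loop index, always 0 ≤ oldVI < len(distances)
      let dist' := dist.set oldVI.toNat (vI - oldVI)
      solvePop v vI rest dist' oldVL' oldVIL'
    else
      (dist, oldVL, oldVIL)

-- body of 'for vI in range(n)'; state = (distances, oldVList, oldVIList)
def solveOuter (vList : List Int) (st : List Int × List Int × List Int) (vI : Int) : List Int × List Int × List Int :=
  let v := (PySem.List.pyGet? vList vI).getD 0
  let st' := solvePop v vI (PySem.List.pyRange ((st.2.1.length : Int) - 1) (-1) (-1)) st.1 st.2.1 st.2.2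
  (st'.1, st'.2.1 ++ [v], st'.2.2 ++ [vI])

-- body of the second 'for i in range(n)' (this loop is verbatim identical in A and in B; shared by both ports); state = (currE, result)
def solveEnergy (vList : List Int) (dist : List Int) (e : Int) (r : Int) (st : Int × Int) (i : Int) : Int × Int :=
  let currE := st.1
  let result := st.2
  let v := (PySem.List.pyGet? vList i).getD 0
  let d := (PySem.List.pyGet? dist i).getD 0
  if d = 0 then
    ((0 : Int) + r, result + v * currE)
  else
    let extraE := currE + d * r - e
    if extraE > 0 then
      let eSpend := min currE extraE
      (currE - eSpend + r, result + v * eSpend)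
    else
      (currE + r, result)

def solve (e : Int) (r : Int) (n : Int) (vList : List Int) : Int :=
  let distances := (PySem.List.pyRange 0 n 1).map (fun _ => (0 : Int))
  let st := (PySem.List.pyRange 0 n 1).foldl (solveOuter vList) (distances, [], [])
  let fin := (PySem.List.pyRange 0 n 1).foldl (solveEnergy vList st.1 e r) (e, 0)
  fin.2

-- ===== PORT B =====
-- inner 'for j in range(i+1, n): if vList[j] > vList[i]: d = j - i; break' (d = 0 if no break)
def solveAltScan (vList : List Int) (i : Int) (js : List Int) : Int :=
  match js with
  | [] => 0
  | j :: rest =>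
    if (PySem.List.pyGet? vList j).getD 0 > (PySem.List.pyGet? vList i).getD 0 then j - i
    else solveAltScan vList i rest

def solve_alt (e : Int) (r : Int) (n : Int) (vList : List Int) : Int :=
  let distances := (PySem.List.pyRange 0 n 1).foldl
    (fun acc i => acc ++ [solveAltScan vList i (PySem.List.pyRange (i + 1) n 1)]) []
  let fin := (PySem.List.pyRange 0 n 1).foldl (solveEnergy vList distances e r) (e, 0)
  fin.2

-- ===== PRECONDITION & SPEC =====
-- Python A indexes vList[vI] for vI in range(n): it raises IndexError exactly when n > len(vList).
def Pre_solve (e : Int) (r : Int) (n : Int) (vList : List Int) : Prop := n ≤ (vList.length : Int)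
instance (e : Int) (r : Int) (n : Int) (vList : List Int) : Decidable (Pre_solve e r n vList) := by unfold Pre_solve; infer_instance
def pvWitness_solve : Int × Int × Int × List Int := (5, 2, 3, [2, 1, 4])

def Spec_solve (e : Int) (r : Int) (n : Int) (vList : List Int) (out : Int) : Prop := out = solve_alt e r n vList
instance (e : Int) (r : Int) (n : Int) (vList : List Int) (out : Int) : Decidable (Spec_solve e r n vList out) := by unfold Spec_solve; infer_instance

-- ===== CLAIM (what is proved, stated in full; the proofs are below) =====
def Claim_equal_solve : Prop := ∀ (e : Int) (r : Int) (n : Int) (vList : List Int), Dom_solve e r n vList → Pre_solve e r n vList → Spec_solve e r n vList (solve e r n vList)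

-- ===== LEMMAS AND PROOFS =====

-- proof-side model: value at a Nat index (default 0), next-greater distance within [0,t), monotonic stack after t steps
def gV (vl : List Int) (j : Nat) : Int := vl.getD j 0

def dvalM (vl : List Int) (t j : Nat) : Int :=
  match (List.range' (j+1) (t - (j+1))).find? (fun k => decide (gV vl j < gV vl k)) with
  | some k => (k : Int) - (j : Int)
  | none => 0

def stackM (vl : List Int) (t : Nat) : List Nat :=
  (List.range t).filter (fun j => (List.range' (j+1) (t - (j+1))).all (fun k => decide (gV vl k ≤ gV vl j)))

lemma pyRange_desc_succ (L : Nat) :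
    PySem.List.pyRange (((L+1:Nat):Int) - 1) (-1) (-1) = (L:Int) :: PySem.List.pyRange (((L:Nat):Int) - 1) (-1) (-1) := by
  simp only [PySem.List.pyRange]
  norm_num
  have e1 : (-1:Int) < (L:Int) := by omega
  have h2 : (if 0 < L then L else 0) = L := by split_ifs <;> omega
  rw [if_pos e1, h2, List.range_succ_eq_map, List.map_cons, List.map_map]
  refine List.cons_eq_cons.mpr ⟨by norm_num, List.map_congr_left ?_⟩
  intro a _
  simp only [Function.comp_apply, Nat.succ_eq_add_one]
  omega

lemma set_map_range (N : Nat) (f : Nat → Int) (w : Nat) (x : Int) :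
    ((List.range N).map f).set w x = (List.range N).map (fun j => if j = w then x else f j) := by
  apply List.ext_getElem
  · simp
  intro i hi hi2
  rw [List.getElem_set]
  simp only [List.getElem_map, List.getElem_range]
  by_cases h : i = w
  · subst h; simp
  · rw [if_neg (by omega), if_neg h]

lemma pyGet_getD (vl : List Int) (m : Nat) : (PySem.List.pyGet? vl ((m:Nat):Int)).getD 0 = gV vl m := by
  rw [PySem.List.pyGet?_natCast, gV, List.getD_eq_getElem?_getD]

lemma mem_stackM (vl : List Int) (t j : Nat) :
    j ∈ stackM vl t ↔ j < t ∧ ∀ k, j < k → k < t → gV vl k ≤ gV vl j := by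
  unfold stackM
  rw [List.mem_filter, List.mem_range, List.all_eq_true]
  constructor
  · rintro ⟨h1, h2⟩
    refine ⟨h1, fun k hk1 hk2 => ?_⟩
    have := h2 k (List.mem_range'_1.mpr ⟨by omega, by omega⟩)
    exact of_decide_eq_true this
  · rintro ⟨h1, h2⟩
    refine ⟨h1, fun k hk => ?_⟩
    rw [List.mem_range'_1] at hk
    exact decide_eq_true (h2 k (by omega) (by omega))

lemma popSpec (vl : List Int) (v vI : Int) (N : Nat) (GS : List Nat) (f : Nat → Int)
    (hlt : GS.Pairwise (· < ·)) (hmono : GS.Pairwise (fun a b => gV vl b ≤ gV vl a)) (hN : ∀ j ∈ GS, j < N) :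
    solvePop v vI (PySem.List.pyRange ((((GS.map (fun j => gV vl j)).length : Nat) : Int) - 1) (-1) (-1))
      ((List.range N).map f) (GS.map (fun j => gV vl j)) (GS.map (fun (j : Nat) => (j : Int)))
    = ((List.range N).map (fun j => if j ∈ GS ∧ gV vl j < v then vI - (j:Int) else f j),
       (GS.filter (fun j => decide (v ≤ gV vl j))).map (fun j => gV vl j),
       (GS.filter (fun j => decide (v ≤ gV vl j))).map (fun (j : Nat) => (j : Int))) := by
  induction GS using List.reverseRecOn generalizing f with
  | nil =>
    simp [solvePop]
  | append_singleton ys w ih =>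
    have hwys : ∀ a ∈ ys, a < w := by
      intro a ha
      exact (List.pairwise_append.mp hlt).2.2 a ha w (List.mem_singleton.mpr rfl)
    have hwmono : ∀ a ∈ ys, gV vl w ≤ gV vl a := by
      intro a ha
      exact (List.pairwise_append.mp hmono).2.2 a ha w (List.mem_singleton.mpr rfl)
    have hlt' : ys.Pairwise (· < ·) := (List.pairwise_append.mp hlt).1
    have hmono' : ys.Pairwise (fun a b => gV vl b ≤ gV vl a) := (List.pairwise_append.mp hmono).1
    have hN' : ∀ j ∈ ys, j < N := fun j hj => hN j (List.mem_append_left _ hj)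
    have hwN : w < N := hN w (List.mem_append_right _ (List.mem_singleton.mpr rfl))
    have hwniys : w ∉ ys := fun h => lt_irrefl w (hwys w h)
    -- lists
    have hmapg : (ys ++ [w]).map (fun j => gV vl j) = ys.map (fun j => gV vl j) ++ [gV vl w] := by simp
    have hmapc : (ys ++ [w]).map (fun (j : Nat) => ((j:Nat):Int)) = ys.map (fun (j : Nat) => ((j:Nat):Int)) ++ [((w:Nat):Int)] := by simp
    rw [hmapg, hmapc]
    rw [show (List.map (fun j => gV vl j) ys ++ [gV vl w]).length = ys.length + 1 from by simp, pyRange_desc_succ]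
    -- unfold one step of solvePop
    rw [solvePop]
    have hget : (PySem.List.pyGet? (ys.map (fun j => gV vl j) ++ [gV vl w]) ((ys.length : Nat):Int)).getD 0 = gV vl w := by
      have : (ys.length : Nat) = (ys.map (fun j => gV vl j)).length := by simp
      rw [this]
      rw [show ([gV vl w] : List Int) = gV vl w :: [] from rfl]
      rw [PySem.List.pyGet?_append_length]
      rfl
    simp only [hget]
    by_cases hc : gV vl w < v
    · rw [if_pos hc]
      -- pops
      have hp1 : PySem.List.pop? (ys.map (fun (j : Nat) => ((j:Nat):Int)) ++ [((w:Nat):Int)]) ((ys.length : Nat):Int)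
          = some (((w:Nat):Int), ys.map (fun (j : Nat) => ((j:Nat):Int))) := by
        rw [PySem.List.pop?_natCast _ ys.length (by simp)]
        congr 1
        refine Prod.ext ?_ ?_
        · show (ys.map (fun (j : Nat) => ((j:Nat):Int)) ++ [((w:Nat):Int)])[ys.length]'(by simp) = _
          simp
        · show (ys.map (fun (j : Nat) => ((j:Nat):Int)) ++ [((w:Nat):Int)]).eraseIdx ys.length = _
          rw [show ys.length = (ys.map (fun (j : Nat) => ((j:Nat):Int))).length from by simp]
          rw [List.eraseIdx_append_of_length_le (le_refl _)]
          simp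
      have hp2 : PySem.List.pop? (ys.map (fun j => gV vl j) ++ [gV vl w]) ((ys.length : Nat):Int)
          = some ((gV vl w), ys.map (fun j => gV vl j)) := by
        rw [PySem.List.pop?_natCast _ ys.length (by simp)]
        congr 1
        refine Prod.ext ?_ ?_
        · simp
        · show (ys.map (fun j => gV vl j) ++ [gV vl w]).eraseIdx ys.length = _
          rw [show ys.length = (ys.map (fun j => gV vl j)).length from by simp]
          rw [List.eraseIdx_append_of_length_le (le_refl _)]
          simp
      simp only [hp1, hp2, Option.getD_some]
      have hset : ((List.range N).map f).set (((w:Nat):Int)).toNat (vI - ((w:Nat):Int))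
          = (List.range N).map (fun j => if j = w then vI - ((w:Nat):Int) else f j) := by
        rw [Int.toNat_natCast, set_map_range]
      rw [hset]
      have hlen2 : (ys.length : Nat) = (ys.map (fun j => gV vl j)).length := by simp
      rw [hlen2]
      rw [ih (fun j => if j = w then vI - ((w:Nat):Int) else f j) hlt' hmono' hN']
      refine Prod.ext ?_ (Prod.ext ?_ ?_)
      · show (List.range N).map _ = (List.range N).map _
        apply List.map_congr_left
        intro j _
        by_cases hj : j = w
        · subst hj
          rw [if_neg (fun h => hwniys h.1), if_pos rfl, if_pos ⟨by simp, hc⟩]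
        · have : (j ∈ ys ++ [w]) ↔ j ∈ ys := by simp [hj]
          by_cases hj2 : j ∈ ys ∧ gV vl j < v
          · rw [if_pos hj2, if_pos ⟨List.mem_append_left _ hj2.1, hj2.2⟩]
          · rw [if_neg hj2, if_neg hj, if_neg (by rw [this]; exact hj2)]
      · show _ = ((ys ++ [w]).filter _).map _
        rw [List.filter_append]
        have : ([w].filter (fun j => decide (v ≤ gV vl j))) = [] := by simp [not_le.mpr hc]
        rw [this, List.append_nil]
      · show _ = ((ys ++ [w]).filter _).map _
        rw [List.filter_append]
        have : ([w].filter (fun j => decide (v ≤ gV vl j))) = [] := by simp [not_le.mpr hc]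
        rw [this, List.append_nil]
    · rw [if_neg hc]
      have hfil : (ys ++ [w]).filter (fun j => decide (v ≤ gV vl j)) = ys ++ [w] := by
        rw [List.filter_eq_self]
        intro a ha
        rcases List.mem_append.mp ha with h | h
        · exact decide_eq_true (le_trans (not_lt.mp hc) (hwmono a h))
        · rw [List.mem_singleton.mp h]; exact decide_eq_true (not_lt.mp hc)
      rw [hfil, hmapg, hmapc]
      refine Prod.ext ?_ rfl
      show (List.range N).map f = (List.range N).map _
      apply List.map_congr_left
      intro j _
      by_cases hj : j ∈ ys ++ [w]
      · have : ¬ gV vl j < v := by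
          rcases List.mem_append.mp hj with h | h
          · exact not_lt.mpr (le_trans (not_lt.mp hc) (hwmono j h))
          · rw [List.mem_singleton.mp h]; exact hc
        rw [if_neg (fun h => this h.2)]
      · rw [if_neg (fun h => hj h.1)]

lemma stack_step (vl : List Int) (t : Nat) :
    stackM vl (t+1) = (stackM vl t).filter (fun j => decide (gV vl t ≤ gV vl j)) ++ [t] := by
  unfold stackM
  rw [List.range_succ, List.filter_append, List.filter_filter]
  congr 1
  · apply List.filter_congr
    intro j hj
    rw [List.mem_range] at hj
    have h1 : (t+1) - (j+1) = (t - (j+1)) + 1 := by omega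
    rw [h1, List.range'_concat]
    have h2 : j + 1 + 1 * (t - (j+1)) = t := by omega
    rw [h2, List.all_append]
    simp only [List.all_cons, List.all_nil, Bool.and_true]
    rw [Bool.and_comm]
  · simp

lemma dist_step (vl : List Int) (t j : Nat) :
    (if j ∈ stackM vl t ∧ gV vl j < gV vl t then ((t:Nat):Int) - (j:Int) else dvalM vl t j)
    = dvalM vl (t+1) j := by
  by_cases hjt : t ≤ j
  · have hmem : j ∉ stackM vl t := fun h => by rw [mem_stackM] at h; omega
    rw [if_neg (fun h => hmem h.1)]
    unfold dvalM
    have h1 : t - (j+1) = 0 := by omega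
    have h2 : (t+1) - (j+1) = 0 := by omega
    rw [h1, h2]
  · push_neg at hjt
    have hsplit : List.range' (j+1) ((t+1) - (j+1)) = List.range' (j+1) (t - (j+1)) ++ [t] := by
      have h1 : (t+1) - (j+1) = (t - (j+1)) + 1 := by omega
      rw [h1, List.range'_concat]
      have h2 : j + 1 + 1 * (t - (j+1)) = t := by omega
      rw [h2]
    by_cases hmem : j ∈ stackM vl t
    · have hnone : (List.range' (j+1) (t - (j+1))).find? (fun k => decide (gV vl j < gV vl k)) = none := by
        rw [List.find?_eq_none]
        intro x hx
        rw [List.mem_range'_1] at hx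
        have := (mem_stackM vl t j).mp hmem
        simp only [decide_eq_true_eq, not_lt]
        exact not_lt.mp (not_lt.mpr (this.2 x (by omega) (by omega)))
      unfold dvalM
      rw [hsplit, List.find?_append, hnone, Option.none_or]
      by_cases hlt : gV vl j < gV vl t
      · rw [if_pos ⟨hmem, hlt⟩]
        simp [hlt]
      · rw [if_neg (fun h => hlt h.2)]
        simp [hlt]
    · rw [if_neg (fun h => hmem h.1)]
      have hex : ∃ x ∈ List.range' (j+1) (t - (j+1)), decide (gV vl j < gV vl x) = true := by
        rw [mem_stackM] at hmem
        push_neg at hmem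
        obtain ⟨k, hk1, hk2, hk3⟩ := hmem hjt
        exact ⟨k, List.mem_range'_1.mpr ⟨by omega, by omega⟩, decide_eq_true hk3⟩
      have hsome : ((List.range' (j+1) (t - (j+1))).find? (fun k => decide (gV vl j < gV vl k))).isSome := by
        rw [List.find?_isSome]
        exact hex
      unfold dvalM
      rw [hsplit, List.find?_append]
      obtain ⟨k0, hk0⟩ := Option.isSome_iff_exists.mp hsome
      rw [hk0, Option.some_or]

lemma outer_step (vl : List Int) (N t : Nat) (ht : t < N) :
    solveOuter vl ((List.range N).map (dvalM vl t), (stackM vl t).map (fun (j : Nat) => gV vl j), (stackM vl t).map (fun (j : Nat) => (j:Int))) ((t:Nat) : Int)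
    = ((List.range N).map (dvalM vl (t+1)), (stackM vl (t+1)).map (fun (j : Nat) => gV vl j), (stackM vl (t+1)).map (fun (j : Nat) => (j:Int))) := by
  have hlt : (stackM vl t).Pairwise (· < ·) := List.pairwise_lt_range.filter _
  have hmono : (stackM vl t).Pairwise (fun a b => gV vl b ≤ gV vl a) := by
    refine hlt.imp_of_mem (fun {a b} ha hb hab => ?_)
    have hb' : b < t := ((mem_stackM vl t b).mp hb).1
    exact ((mem_stackM vl t a).mp ha).2 b hab hb'
  have hN : ∀ j ∈ stackM vl t, j < N := fun j hj => lt_trans ((mem_stackM vl t j).mp hj).1 ht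
  simp only [solveOuter, pyGet_getD]
  rw [popSpec vl (gV vl t) ((t:Nat):Int) N (stackM vl t) (dvalM vl t) hlt hmono hN]
  rw [stack_step]
  refine Prod.ext ?_ (Prod.ext ?_ ?_)
  · show (List.range N).map _ = (List.range N).map _
    apply List.map_congr_left
    intro j _
    exact dist_step vl t j
  · simp
  · simp

lemma Aloop (vl : List Int) (N : Nat) (t : Nat) (ht : t ≤ N) :
    ((List.range t).map (fun (k : Nat) => (k:Int))).foldl (solveOuter vl) ((List.range N).map (fun _ => (0:Int)), [], [])
    = ((List.range N).map (dvalM vl t), (stackM vl t).map (fun (j : Nat) => gV vl j), (stackM vl t).map (fun (j : Nat) => (j:Int))) := by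
  induction t with
  | zero =>
    simp only [List.range_zero, List.map_nil, List.foldl_nil, stackM, List.filter_nil]
    refine Prod.ext ?_ rfl
    show (List.range N).map _ = (List.range N).map _
    apply List.map_congr_left
    intro j _
    unfold dvalM
    simp
  | succ t ih =>
    rw [List.range_succ, List.map_append, List.foldl_append, ih (by omega)]
    simpa using outer_step vl N t (by omega)

lemma foldl_app_map {α β : Type} (l : List α) (f : α → β) (acc : List β) :
    l.foldl (fun a x => a ++ [f x]) acc = acc ++ l.map f := by
  induction l generalizing acc with
  | nil => simp
  | cons x xs ih => simp [ih]

lemma scan_model (vl : List Int) (k : Nat) (js : List Nat) :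
    solveAltScan vl ((k:Nat) : Int) (js.map (fun (m : Nat) => ((m:Nat) : Int)))
    = (match js.find? (fun m => decide (gV vl k < gV vl m)) with
       | some m => (m : Int) - (k : Int)
       | none => 0) := by
  induction js with
  | nil => simp [solveAltScan]
  | cons m rest ih =>
    simp only [List.map_cons, solveAltScan, pyGet_getD, List.find?_cons]
    by_cases h : gV vl k < gV vl m
    · rw [if_pos h]; simp [h]
    · rw [if_neg h, ih]; simp [h]

lemma Bdist (vl : List Int) (n : Int) (N : Nat) (hN : n.toNat = N) :
    (PySem.List.pyRange 0 n 1).foldl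
      (fun acc i => acc ++ [solveAltScan vl i (PySem.List.pyRange (i + 1) n 1)]) []
    = (List.range N).map (dvalM vl N) := by
  have hout : PySem.List.pyRange 0 n 1 = (List.range N).map (fun (k : Nat) => (k:Int)) := by
    rw [PySem.List.pyRange_one]
    have : (n - 0).toNat = N := by omega
    rw [this]
    apply List.map_congr_left
    intro a _
    ring
  rw [hout, foldl_app_map, List.nil_append, List.map_map]
  apply List.map_congr_left
  intro k hk
  rw [List.mem_range] at hk
  simp only [Function.comp_apply]
  have h1 : PySem.List.pyRange ((k:Int) + 1) n 1
      = (List.range' (k+1) (N - (k+1))).map (fun (m : Nat) => ((m:Nat):Int)) := by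
    rw [PySem.List.pyRange_one, List.range'_eq_map_range, List.map_map]
    have : (n - ((k:Int)+1)).toNat = N - (k+1) := by omega
    rw [this]
    apply List.map_congr_left
    intro a _
    simp only [Function.comp_apply]
    push_cast
    ring
  rw [h1, scan_model, dvalM]

-- ===== VERDICT (by name: the statement is the Claim_ definition above) =====
theorem solve_spec : Claim_equal_solve := by
  unfold Claim_equal_solve
  intro e r n vList _ _
  unfold Spec_solve
  show ((PySem.List.pyRange 0 n 1).foldl
          (solveEnergy vList ((PySem.List.pyRange 0 n 1).foldl (solveOuter vList)
            ((PySem.List.pyRange 0 n 1).map (fun _ => (0:Int)), [], [])).1 e r) (e, 0)).2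
      = ((PySem.List.pyRange 0 n 1).foldl
          (solveEnergy vList ((PySem.List.pyRange 0 n 1).foldl
            (fun acc i => acc ++ [solveAltScan vList i (PySem.List.pyRange (i + 1) n 1)]) []) e r) (e, 0)).2
  have hout : PySem.List.pyRange 0 n 1 = (List.range n.toNat).map (fun (k : Nat) => (k:Int)) := by
    rw [PySem.List.pyRange_one]
    have : (n - 0).toNat = n.toNat := by omega
    rw [this]
    apply List.map_congr_left
    intro a _
    ring
  have hzeros : (PySem.List.pyRange 0 n 1).map (fun _ => (0:Int))
      = (List.range n.toNat).map (fun _ => (0:Int)) := by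
    rw [hout, List.map_map]
    rfl
  rw [Bdist vList n n.toNat rfl, hzeros]
  rw [show (PySem.List.pyRange 0 n 1).foldl (solveOuter vList)
        ((List.range n.toNat).map (fun _ => (0:Int)), [], [])
      = ((List.range n.toNat).map (fun (k : Nat) => (k:Int))).foldl (solveOuter vList)
        ((List.range n.toNat).map (fun _ => (0:Int)), [], []) from by rw [hout]]
  rw [Aloop vList n.toNat n.toNat le_rfl]
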